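-- pv_equiv track=rewrite | github.com/ruby1304/prompt-lab | src/chains.py | _merge_variables
-- ===== SOURCE A (Python) =====
-- from typing import Any, Dict, Iterable, Mapping, Optional, Tuple, Union
--
-- def _merge_variables(
--     required_vars: Iterable[str],
--     provided_vars: Mapping[str, Any],
--     fallback: Mapping[str, Any] | None = None,
-- ) -> Dict[str, Any]:
--     """确保每个必需变量都有值，并应用兜底逻辑。
--
--     优先级：用户传入 > prompt 配置 defaults > 全局默认空字符串。
--     """
--
--     fallback = fallback or {}
--     merged: Dict[str, Any] = {}
--     for key in required_vars:
--         if key in provided_vars: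
--             merged[key] = provided_vars[key]
--         elif key in fallback:
--             merged[key] = fallback[key]
--         else:
--             merged[key] = ""
--     return merged
-- ===== SOURCE B (Python) =====
-- def _merge_variables(required_vars, provided_vars, fallback=None):
--     fallback = fallback or {}
--     keys = list(required_vars)
--     merged = {k: "" for k in keys}
--     for k in keys:
--         if k in fallback:
--             merged[k] = fallback[k]
--     for k in keys:
--         if k in provided_vars:
--             merged[k] = provided_vars[k]
--     return merged
-- ===== Notes on version B (the rewrite author's own statement) =====
-- stated objective: alternative
-- what changed: Replaces A's single pass with a per-key 3-way branch by three overlay passes: seed every required key with '', then overwrite from fallback, then overwrite from provided_vars, building the priority by layering instead of branching.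
import Mathlib
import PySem

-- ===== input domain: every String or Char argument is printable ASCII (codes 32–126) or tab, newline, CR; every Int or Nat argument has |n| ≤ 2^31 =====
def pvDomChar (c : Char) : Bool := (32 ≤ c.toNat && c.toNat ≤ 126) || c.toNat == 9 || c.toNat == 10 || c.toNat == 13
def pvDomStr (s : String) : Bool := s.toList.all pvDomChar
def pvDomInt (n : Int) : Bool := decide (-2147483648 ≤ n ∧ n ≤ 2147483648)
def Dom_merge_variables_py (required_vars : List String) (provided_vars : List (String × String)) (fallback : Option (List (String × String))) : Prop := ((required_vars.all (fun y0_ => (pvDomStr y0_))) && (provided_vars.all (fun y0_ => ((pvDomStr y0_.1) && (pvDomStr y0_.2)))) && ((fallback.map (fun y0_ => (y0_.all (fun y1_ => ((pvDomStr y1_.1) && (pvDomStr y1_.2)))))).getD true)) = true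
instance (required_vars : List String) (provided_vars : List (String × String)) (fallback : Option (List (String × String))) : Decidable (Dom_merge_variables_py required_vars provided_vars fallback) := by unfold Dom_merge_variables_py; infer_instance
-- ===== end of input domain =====

-- B builds the same dict by three overlay passes (seed '' / overwrite from fallback / overwrite from provided)
-- instead of A's single pass with a per-key 3-way branch; same cost, different decomposition.
-- Mappings are association lists (lookup = first match), the returned dict is a PySem.Dict's items list.

-- ===== PORT A =====
def merge_variables_py (required_vars : List String) (provided_vars : List (String × String)) (fallback : Option (List (String × String))) : List (String × String) :=
  -- fallback = fallback or {}
  let fb : List (String × String) := fallback.getD []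
  -- merged = {}; for key in required_vars: 3-way branch
  let merged : PySem.Dict String String :=
    required_vars.foldl (fun d key =>
      match List.lookup key provided_vars with
      | some v => d.insert key v
      | none =>
        match List.lookup key fb with
        | some v => d.insert key v
        | none => d.insert key "") PySem.Dict.empty
  merged.items

-- ===== PORT B =====
def merge_variables_py_alt (required_vars : List String) (provided_vars : List (String × String)) (fallback : Option (List (String × String))) : List (String × String) :=
  -- fallback = fallback or {}
  let fb : List (String × String) := fallback.getD []
  -- keys = list(required_vars); merged = {k: "" for k in keys}
  let m0 : PySem.Dict String String :=
    required_vars.foldl (fun d k => d.insert k "") PySem.Dict.empty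
  -- for k in keys: if k in fallback: merged[k] = fallback[k]
  let m1 : PySem.Dict String String :=
    required_vars.foldl (fun d k =>
      match List.lookup k fb with
      | some v => d.insert k v
      | none => d) m0
  -- for k in keys: if k in provided_vars: merged[k] = provided_vars[k]
  let m2 : PySem.Dict String String :=
    required_vars.foldl (fun d k =>
      match List.lookup k provided_vars with
      | some v => d.insert k v
      | none => d) m1
  m2.items

-- ===== PRECONDITION & SPEC =====
def Spec_merge_variables_py (required_vars : List String) (provided_vars : List (String × String)) (fallback : Option (List (String × String))) (out : List (String × String)) : Prop := out = merge_variables_py_alt required_vars provided_vars fallback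
instance (required_vars : List String) (provided_vars : List (String × String)) (fallback : Option (List (String × String))) (out : List (String × String)) : Decidable (Spec_merge_variables_py required_vars provided_vars fallback out) := by unfold Spec_merge_variables_py; infer_instance

-- ===== CLAIM (what is proved, stated in full; the proofs are below) =====
def Claim_equal_merge_variables_py : Prop := ∀ (required_vars : List String) (provided_vars : List (String × String)) (fallback : Option (List (String × String))), Dom_merge_variables_py required_vars provided_vars fallback → Spec_merge_variables_py required_vars provided_vars fallback (merge_variables_py required_vars provided_vars fallback)

-- ===== LEMMAS AND PROOFS =====

-- A's per-key value: provided > fallback > "".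
def pvVal (provided_vars fb : List (String × String)) (k : String) : String :=
  match List.lookup k provided_vars with
  | some v => v
  | none =>
    match List.lookup k fb with
    | some v => v
    | none => ""

-- lookup of an insert-the-value fold (A's loop, and B's seeding pass with v = const "").
theorem get?_foldl_insert_val (v : String → String) (keys : List String)
    (d : PySem.Dict String String) (x : String) :
    (keys.foldl (fun d k => d.insert k (v k)) d).get? x
      = if x ∈ keys then some (v x) else d.get? x := by
  induction keys generalizing d with
  | nil => simp
  | cons k ks ih =>
    simp only [List.foldl_cons, ih, List.mem_cons, PySem.Dict.get?_insert]
    by_cases hx : x ∈ ks <;> by_cases hk : x = k <;> simp [hx, hk]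

-- lookup of an overlay pass (B's second and third loops).
theorem get?_foldl_overlay (f : String → Option String) (keys : List String)
    (d : PySem.Dict String String) (x : String) :
    (keys.foldl (fun d k => match f k with | some v => d.insert k v | none => d) d).get? x
      = if x ∈ keys ∧ (f x).isSome then f x else d.get? x := by
  induction keys generalizing d with
  | nil => simp
  | cons k ks ih =>
    simp only [List.foldl_cons, ih]
    by_cases hx : x ∈ ks ∧ (f x).isSome
    · simp [hx, List.mem_cons]
    · cases hf : f k with
      | none =>
        by_cases hk : x = k
        · subst hk; simp [hf, List.mem_cons]
        · simp [hx, List.mem_cons, hk]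
      | some v =>
        rw [PySem.Dict.get?_insert]
        by_cases hk : x = k
        · subst hk; simp [List.mem_cons, hf]
        · simp [hx, List.mem_cons, hk]

-- an overlay pass never adds a key: the keys list is unchanged when every visited key is present.
theorem keys_foldl_overlay (f : String → Option String) (keys : List String)
    (d : PySem.Dict String String) (h : ∀ k ∈ keys, d.contains k = true) :
    (keys.foldl (fun d k => match f k with | some v => d.insert k v | none => d) d).keys = d.keys := by
  induction keys generalizing d with
  | nil => rfl
  | cons k ks ih =>
    simp only [List.foldl_cons]
    cases hf : f k with
    | none => exact ih d (fun a ha => h a (List.mem_cons_of_mem _ ha))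
    | some v =>
      rw [ih (d.insert k v)
          (fun a ha => by
            rw [PySem.Dict.contains_insert]
            simp [h a (List.mem_cons_of_mem _ ha)]),
        PySem.Dict.keys_insert_of_contains d v (h k List.mem_cons_self)]

theorem merge_variables_eq (required_vars : List String)
    (provided_vars : List (String × String)) (fallback : Option (List (String × String))) :
    merge_variables_py required_vars provided_vars fallback
      = merge_variables_py_alt required_vars provided_vars fallback := by
  simp only [merge_variables_py, merge_variables_py_alt]
  set fb := fallback.getD [] with hfb
  -- A's fold is an insert-the-value fold with value pvVal
  have hA : (required_vars.foldl (fun d key =>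
      match List.lookup key provided_vars with
      | some v => d.insert key v
      | none =>
        match List.lookup key fb with
        | some v => d.insert key v
        | none => d.insert key "") PySem.Dict.empty)
      = required_vars.foldl (fun d k => d.insert k (pvVal provided_vars fb k)) PySem.Dict.empty := by
    congr 1
    funext d k
    unfold pvVal
    cases List.lookup k provided_vars <;> cases List.lookup k fb <;> simp
  rw [hA]
  set KA := required_vars.foldl (fun d k => d.insert k (pvVal provided_vars fb k)) PySem.Dict.empty with hKA
  set m0 := required_vars.foldl (fun (d : PySem.Dict String String) k => d.insert k "") PySem.Dict.empty with hm0
  set m1 := required_vars.foldl (fun d k =>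
      match List.lookup k fb with | some v => d.insert k v | none => d) m0 with hm1
  set m2 := required_vars.foldl (fun d k =>
      match List.lookup k provided_vars with | some v => d.insert k v | none => d) m1 with hm2
  -- keys
  have hKAkeys : KA.keys = PySem.Set.ofList required_vars := by
    rw [hKA, PySem.Dict.keys_foldl_insert, PySem.Dict.keys_empty, PySem.Set.update_nil_left]
  have hm0keys : m0.keys = PySem.Set.ofList required_vars := by
    rw [hm0, PySem.Dict.keys_foldl_insert, PySem.Dict.keys_empty, PySem.Set.update_nil_left]
  have hm0c : ∀ k ∈ required_vars, m0.contains k = true := by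
    intro k hk
    rw [PySem.Dict.contains_iff_mem_keys, hm0keys]
    exact (PySem.Set.mem_ofList _ _).mpr hk
  have hm1keys : m1.keys = m0.keys := keys_foldl_overlay _ _ _ hm0c
  have hm1c : ∀ k ∈ required_vars, m1.contains k = true := by
    intro k hk
    rw [PySem.Dict.contains_iff_mem_keys, hm1keys, hm0keys]
    exact (PySem.Set.mem_ofList _ _).mpr hk
  have hm2keys : m2.keys = m1.keys := keys_foldl_overlay _ _ _ hm1c
  have hkeys : m2.keys = KA.keys := by rw [hm2keys, hm1keys, hm0keys, hKAkeys]
  -- lookups agree on the keys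
  have hget : ∀ x ∈ required_vars, m2.get? x = KA.get? x := by
    intro x hx
    rw [hKA, get?_foldl_insert_val, if_pos hx,
        hm2, get?_foldl_overlay, hm1, get?_foldl_overlay, hm0, get?_foldl_insert_val, if_pos hx]
    unfold pvVal
    cases hp : List.lookup x provided_vars <;> cases hf : List.lookup x fb <;> simp [hx]
  -- items equal
  have hnd : KA.keys.Nodup := by rw [hKAkeys]; exact PySem.Set.nodup_ofList _
  have hnd2 : m2.keys.Nodup := by rw [hkeys]; exact hnd
  rw [PySem.Dict.items_eq_map_keys KA hnd "", PySem.Dict.items_eq_map_keys m2 hnd2 "", hkeys]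
  refine (List.map_congr_left ?_).symm
  intro x hxk
  have hx : x ∈ required_vars :=
    (PySem.Set.mem_ofList _ _).mp (by rw [← hKAkeys]; exact hxk)
  rw [PySem.Dict.getD_eq_get?_getD, PySem.Dict.getD_eq_get?_getD, hget x hx]

-- ===== VERDICT (by name: the statement is the Claim_ definition above) =====
theorem merge_variables_py_spec : Claim_equal_merge_variables_py := by
  intro required_vars provided_vars fallback _
  unfold Spec_merge_variables_py
  exact merge_variables_eq required_vars provided_vars fallback
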